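-- pv_equiv track=rewrite | github.com/benquick123/code-profiling | code/batch-1/vse-naloge-brez-testov/DN7-M-179.py | dolzina_poti
-- ===== SOURCE A (Python) =====
-- def dolzina_poti(pot):
--     dol_poti = 0
--     for tocka in pot:
--         if tocka == pot[0]:
--             prejsna = tocka
--             continue
--         dolzina = abs(prejsna[0]-tocka[0]) + abs(prejsna[1]-tocka[1])
--         dol_poti += dolzina
--         prejsna = tocka
--     return dol_poti
-- ===== SOURCE B (Python) =====
-- def dolzina_poti(pot):
--     def total_variation(seq):
--         return sum(abs(b - a) for a, b in zip(seq, seq[1:]))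
--     xs = [p[0] for p in pot]
--     ys = [p[1] for p in pot]
--     return total_variation(xs) + total_variation(ys)
-- ===== Notes on version B (the rewrite author's own statement) =====
-- stated objective: simpler
-- what changed: Computes the Manhattan path length coordinatewise: unzip into x- and y-sequences and add the total variation of each, instead of A's stateful prejsna/continue scan over points.
-- intended difference: On paths where the first point reappears immediately after a different point, A silently drops the segment leading into that reoccurrence (its 'tocka == pot[0]' test matches by value, not just the first element), returning a too-small length, while B returns the full sum of consecutive Manhattan distances, which is the intended path length. — e.g. on dolzina_poti([(0,0),(1,0),(0,0)]): A returns 1, B returns 2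
import Mathlib
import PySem

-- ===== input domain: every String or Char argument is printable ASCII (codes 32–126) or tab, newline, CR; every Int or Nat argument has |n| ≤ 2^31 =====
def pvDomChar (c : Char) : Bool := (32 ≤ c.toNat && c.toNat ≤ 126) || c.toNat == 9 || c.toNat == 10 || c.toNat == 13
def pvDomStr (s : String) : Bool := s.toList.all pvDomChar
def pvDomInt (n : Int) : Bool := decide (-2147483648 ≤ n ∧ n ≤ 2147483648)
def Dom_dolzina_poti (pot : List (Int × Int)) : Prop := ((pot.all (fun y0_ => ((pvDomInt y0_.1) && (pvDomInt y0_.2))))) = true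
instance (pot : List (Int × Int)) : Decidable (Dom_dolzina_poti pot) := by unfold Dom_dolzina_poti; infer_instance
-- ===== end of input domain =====

-- B computes the path length coordinatewise (total variation of x's plus total variation of y's);
-- A wrongly skips segments into points equal to the start (D_ below); B returns the intended length there.


-- ===== PORT A =====
-- A's loop keeps (dol_poti, prejsna); `prejsna` is uninitialised before the first
-- iteration but the first iteration always takes the `tocka == pot[0]` branch, so the
-- initial second component (we use pot[0]) is never read.
def dolzina_poti (pot : List (Int × Int)) : Int :=
  match pot with
  | [] => 0
  | p0 :: _ =>
    (pot.foldl
      (fun (s : Int × (Int × Int)) (tocka : Int × Int) =>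
        if tocka = p0 then (s.1, tocka)
        else (s.1 + (|s.2.1 - tocka.1| + |s.2.2 - tocka.2|), tocka))
      (0, p0)).1

-- ===== PORT B =====
-- total_variation(seq) = sum of |b - a| over adjacent pairs of seq
def totalVariation (seq : List Int) : Int :=
  ((seq.zip (seq.drop 1)).map (fun ab => |ab.2 - ab.1|)).sum

def dolzina_poti_alt (pot : List (Int × Int)) : Int :=
  totalVariation (pot.map Prod.fst) + totalVariation (pot.map Prod.snd)

-- ===== PRECONDITION & SPEC =====
-- On paths where the first point reappears immediately after a different point, A drops the
-- segment leading into that reoccurrence and returns a too-small length; B returns the full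
-- sum of consecutive Manhattan distances, the intended path length.
def D_dolzina_poti (pot : List (Int × Int)) : Prop :=
  match pot with
  | [] => False
  | p0 :: _ => ∃ ab ∈ pot.zip (pot.drop 1), ab.2 = p0 ∧ ab.1 ≠ p0
instance (pot : List (Int × Int)) : Decidable (D_dolzina_poti pot) := by
  unfold D_dolzina_poti; cases pot <;> infer_instance

def Spec_dolzina_poti (pot : List (Int × Int)) (out : Int) : Prop :=
  ¬ D_dolzina_poti pot → out = dolzina_poti_alt pot
instance (pot : List (Int × Int)) (out : Int) : Decidable (Spec_dolzina_poti pot out) := by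
  unfold Spec_dolzina_poti; infer_instance

def pvDiffWitness_dolzina_poti : (List (Int × Int)) := [(0,0),(1,0),(0,0)]
def pvDiffWitnessOut_dolzina_poti : Int × Int := (1, 2)

-- ===== CLAIM =====
def Claim_unchanged_dolzina_poti : Prop :=
  ∀ (pot : List (Int × Int)), Dom_dolzina_poti pot → Spec_dolzina_poti pot (dolzina_poti pot)
def Claim_changed_dolzina_poti : Prop :=
  Dom_dolzina_poti (pvDiffWitness_dolzina_poti) ∧ D_dolzina_poti (pvDiffWitness_dolzina_poti) ∧
  dolzina_poti (pvDiffWitness_dolzina_poti) = pvDiffWitnessOut_dolzina_poti.1 ∧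
  dolzina_poti_alt (pvDiffWitness_dolzina_poti) = pvDiffWitnessOut_dolzina_poti.2 ∧
  pvDiffWitnessOut_dolzina_poti.1 ≠ pvDiffWitnessOut_dolzina_poti.2
def Claim_exact_dolzina_poti : Prop :=
  ∀ (pot : List (Int × Int)), Dom_dolzina_poti pot → D_dolzina_poti pot →
    dolzina_poti pot ≠ dolzina_poti_alt pot

-- ===== LEMMAS AND PROOFS =====

-- Manhattan distance of one adjacent pair
def pvDist (ab : (Int × Int) × (Int × Int)) : Int := |ab.1.1 - ab.2.1| + |ab.1.2 - ab.2.2|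

-- A's fold computes the sum of distances over the pairs whose endpoint differs from p0.
theorem dolzina_poti_fold_sum (p0 : Int × Int) (l : List (Int × Int)) (acc : Int)
    (prev : Int × Int) :
    (l.foldl
      (fun (s : Int × (Int × Int)) (tocka : Int × Int) =>
        if tocka = p0 then (s.1, tocka)
        else (s.1 + (|s.2.1 - tocka.1| + |s.2.2 - tocka.2|), tocka))
      (acc, prev)).1
    = acc + ((((prev :: l).zip l).filter (fun ab => ab.2 ≠ p0)).map pvDist).sum := by
  induction l generalizing acc prev with
  | nil => simp
  | cons t ts ih =>
    by_cases h : t = p0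
    · simp [h, List.foldl_cons, ih, List.zip, List.zipWith]
    · simp [h, List.foldl_cons, ih, List.zip, List.zipWith, pvDist]; ring

-- The full pairwise distance sum splits coordinatewise.
theorem pairwise_tv : ∀ (l : List (Int × Int)),
    ((l.zip (l.drop 1)).map pvDist).sum
      = totalVariation (l.map Prod.fst) + totalVariation (l.map Prod.snd)
  | [] => by simp [totalVariation]
  | [a] => by simp [totalVariation]
  | a :: b :: t => by
    have ih := pairwise_tv (b :: t)
    simp [totalVariation, List.zip, pvDist] at ih ⊢
    have h1 : |a.1 - b.1| = |b.1 - a.1| := abs_sub_comm _ _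
    have h2 : |a.2 - b.2| = |b.2 - a.2| := abs_sub_comm _ _
    omega

-- Splitting the full sum into kept and skipped parts.
theorem sum_filter_split (L : List ((Int × Int) × (Int × Int))) (p0 : Int × Int) :
    ((L.map pvDist).sum)
      = (((L.filter (fun ab => ab.2 ≠ p0)).map pvDist).sum)
        + (((L.filter (fun ab => ab.2 = p0)).map pvDist).sum) := by
  induction L with
  | nil => simp
  | cons x xs ih =>
    by_cases h : x.2 = p0 <;> simp [h, ih] <;> ring

theorem pvDist_nonneg (ab : (Int × Int) × (Int × Int)) : 0 ≤ pvDist ab := by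
  have := abs_nonneg (ab.1.1 - ab.2.1)
  have := abs_nonneg (ab.1.2 - ab.2.2)
  simp [pvDist]; omega

theorem sum_map_dist_nonneg (L : List ((Int × Int) × (Int × Int))) :
    0 ≤ (L.map pvDist).sum := by
  induction L with
  | nil => simp
  | cons x xs ih => have := pvDist_nonneg x; simp; omega

-- A = kept-part sum, for any nonempty pot.
theorem dolzina_poti_cons (p0 : Int × Int) (rest : List (Int × Int)) :
    dolzina_poti (p0 :: rest)
      = ((((p0 :: rest).zip rest).filter (fun ab => ab.2 ≠ p0)).map pvDist).sum := by
  simp only [dolzina_poti, List.foldl_cons]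
  rw [dolzina_poti_fold_sum]
  simp

theorem alt_eq_full (pot : List (Int × Int)) :
    dolzina_poti_alt pot = ((pot.zip (pot.drop 1)).map pvDist).sum := by
  rw [dolzina_poti_alt, pairwise_tv]

-- ===== VERDICT =====
theorem dolzina_poti_spec : Claim_unchanged_dolzina_poti := by
  intro pot _ hnD
  cases pot with
  | nil => rfl
  | cons p0 rest =>
    rw [dolzina_poti_cons, alt_eq_full]
    simp only [List.drop_succ_cons, List.drop_zero]
    rw [sum_filter_split ((p0 :: rest).zip rest) p0]
    have hz : (((p0 :: rest).zip rest).filter (fun ab => ab.2 = p0)).map pvDist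
        = (((p0 :: rest).zip rest).filter (fun ab => ab.2 = p0)).map (fun _ => (0 : Int)) := by
      apply List.map_congr_left
      intro ab hab
      have hmem := List.mem_filter.mp hab
      have h2 : ab.2 = p0 := by simpa using hmem.2
      have h1 : ab.1 = p0 := by
        by_contra h1
        exact hnD ⟨ab, hmem.1, h2, h1⟩
      simp [pvDist, h1, h2]
    rw [hz]
    simp

theorem dolzina_poti_changed : Claim_changed_dolzina_poti := by
  unfold Claim_changed_dolzina_poti; decide

theorem dolzina_poti_tight : Claim_exact_dolzina_poti := by
  intro pot _ hD
  cases pot with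
  | nil => exact absurd hD (by simp [D_dolzina_poti])
  | cons p0 rest =>
    obtain ⟨ab, hmem, h2, h1⟩ := hD
    simp only [List.drop_succ_cons, List.drop_zero] at hmem
    rw [dolzina_poti_cons, alt_eq_full]
    simp only [List.drop_succ_cons, List.drop_zero]
    rw [sum_filter_split ((p0 :: rest).zip rest) p0]
    have habmem : ab ∈ ((p0 :: rest).zip rest).filter (fun ab => ab.2 = p0) := by
      simp [List.mem_filter, hmem, h2]
    have hpos : 0 < pvDist ab := by
      have hne : ab.1 ≠ ab.2 := by rw [h2]; exact h1
      rcases ab with ⟨⟨x1, y1⟩, ⟨x2, y2⟩⟩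
      simp only [pvDist]
      have : x1 ≠ x2 ∨ y1 ≠ y2 := by
        by_contra h; push Not at h; exact hne (by simp [h.1, h.2])
      rcases this with h | h
      · have : 0 < |x1 - x2| := abs_pos.mpr (sub_ne_zero.mpr h)
        have := abs_nonneg (y1 - y2); omega
      · have : 0 < |y1 - y2| := abs_pos.mpr (sub_ne_zero.mpr h)
        have := abs_nonneg (x1 - x2); omega
    have hsumpos : 0 < ((((p0 :: rest).zip rest).filter (fun ab => ab.2 = p0)).map pvDist).sum := by
      obtain ⟨l1, l2, hsplit⟩ := List.mem_iff_append.mp habmem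
      rw [hsplit]
      have := sum_map_dist_nonneg l1
      have := sum_map_dist_nonneg l2
      simp [List.map_append]; omega
    omega
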